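-- pv_equiv track=rewrite | github.com/phanitejakesha/aprogrammer | Python/Dynamicprogramming/902.py | rec
-- ===== SOURCE A (Python) =====
-- def rec(D, num):
--     ebase = 0
--     result = 0
--     length = len(num)
--     if length == 0:
--         return 1
--     base = len(D)
--     for n in D:
--         if int(n) < int(num[0]):
--             ebase += 1
--     if ebase != 0:
--         if length > 1:
--             result += ebase * base**(length -1)
--         else:
--             result += ebase
--     if num[0] in D:
--         if length > 1:
--             result += rec(D, num[1:])
--         elif length == 1:
--             result += 1
--     return result
-- ===== SOURCE B (Python) =====
-- def rec(D, num):
--     length = len(num)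
--     if length == 0:
--         return 1
--     result = 0
--     base = len(D)
--     broke = False
--     for i, c in enumerate(num):
--         result += sum(1 for d in D if int(d) < int(c)) * base ** (length - 1 - i)
--         if c not in D:
--             broke = True
--             break
--     if not broke:
--         result += 1
--     return result
-- ===== Notes on version B (the rewrite author's own statement) =====
-- stated objective: alternative
-- what changed: Replaces A's recursion on successive string suffixes by a single iterative loop over the digits of num with an accumulator and early break at the first digit not in D, adding 1 at the end only when every digit is in D.
import Mathlib
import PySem

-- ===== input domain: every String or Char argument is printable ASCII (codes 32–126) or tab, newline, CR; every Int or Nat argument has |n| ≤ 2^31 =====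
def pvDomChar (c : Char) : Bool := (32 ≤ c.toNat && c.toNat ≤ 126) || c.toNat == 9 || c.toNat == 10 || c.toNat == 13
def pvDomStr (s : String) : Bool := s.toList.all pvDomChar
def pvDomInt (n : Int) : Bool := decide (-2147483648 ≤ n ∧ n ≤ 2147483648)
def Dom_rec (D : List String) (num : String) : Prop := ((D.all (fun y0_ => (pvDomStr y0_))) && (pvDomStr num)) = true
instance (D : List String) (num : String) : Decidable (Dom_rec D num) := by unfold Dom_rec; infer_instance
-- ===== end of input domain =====

-- B replaces A's recursion on string suffixes by one iterative loop over the digits with an accumulator and early break (alternative decomposition, same cost).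


-- ===== PORT A =====
-- Recursion on the list of characters of num (num[1:] = the tail).  int(s) is
-- PySem.Int.ofStr?; Pre_rec guarantees every int() that Python actually
-- evaluates succeeds, so the `.getD 0` default is never the decisive value on
-- admitted inputs.
def recA (D : List String) (l : List Char) : Int :=
  match l with
  | [] => 1                                   -- length == 0: return 1
  | c :: rest =>
    let base : Int := (D.length : Int)
    let ebase : Int :=
      D.foldl (fun acc n =>
        if (PySem.Int.ofStr? n).getD 0 < (PySem.Int.ofStr? (String.ofList [c])).getD 0
        then acc + 1 else acc) 0
    let r1 : Int :=
      if ebase ≠ 0 then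
        (if rest.length > 0 then ebase * base ^ rest.length else ebase)
      else 0
    let r2 : Int :=
      if String.ofList [c] ∈ D then
        (if rest.length > 0 then recA D rest else 1)
      else 0
    r1 + r2

def rec (D : List String) (num : String) : Int := recA D num.toList

-- ===== PORT B =====
-- The loop `for i, c in enumerate(num)` with accumulator `result` and break.
def recLoop (D : List String) (base : Int) (l : List Char) (L : Nat) (i : Nat) (r : Int) : Int :=
  match l with
  | [] => r + 1                               -- loop finished without break
  | c :: rest =>
    let cnt : Int :=
      ((D.filter (fun n =>
        (PySem.Int.ofStr? n).getD 0 < (PySem.Int.ofStr? (String.ofList [c])).getD 0)).length : Int)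
    let r' : Int := r + cnt * base ^ (L - 1 - i)
    if String.ofList [c] ∈ D then recLoop D base rest L (i + 1) r' else r'

def rec_alt (D : List String) (num : String) : Int :=
  let l := num.toList
  if l.length = 0 then 1
  else recLoop D (D.length : Int) l l.length 0 0

-- ===== PRECONDITION & SPEC =====
-- Pre_rec excludes exactly the inputs on which the Python raises ValueError:
-- with num nonempty and D nonempty, every string of D must parse as int, and
-- every character of num that the walk reaches (the in-D prefix plus the first
-- digit after it) must parse as int.
def Pre_rec (D : List String) (num : String) : Prop :=
  num.toList = [] ∨ D = [] ∨
    ((∀ s ∈ D, (PySem.Int.ofStr? s).isSome = true) ∧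
     ∀ c ∈ (num.toList.take
       ((num.toList.takeWhile (fun c => decide (String.ofList [c] ∈ D))).length + 1)),
       (PySem.Int.ofStr? (String.ofList [c])).isSome = true)
instance (D : List String) (num : String) : Decidable (Pre_rec D num) := by
  unfold Pre_rec; infer_instance

def pvWitness_rec : List String × String := (["1"], "")

def Spec_rec (D : List String) (num : String) (out : Int) : Prop := out = rec_alt D num
instance (D : List String) (num : String) (out : Int) : Decidable (Spec_rec D num out) := by
  unfold Spec_rec; infer_instance

-- ===== CLAIM (what is proved, stated in full; the proofs are below) =====
def Claim_equal_rec : Prop :=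
  ∀ (D : List String) (num : String), Dom_rec D num → Pre_rec D num → Spec_rec D num (rec D num)

-- ===== LEMMAS AND PROOFS =====

-- A's hand-rolled counter equals B's filter length.
theorem foldl_count_filter (p : String → Prop) [DecidablePred p] (D : List String) (r : Int) :
    D.foldl (fun acc n => if p n then acc + 1 else acc) r
      = r + ((D.filter (fun n => decide (p n))).length : Int) := by
  induction D generalizing r with
  | nil => simp
  | cons n D ih =>
    simp only [List.foldl, List.filter]
    by_cases h : p n
    · simp only [h, if_pos, decide_true, ih]; simp only [List.length_cons]; push_cast; ring
    · simp [h, ih]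

-- Value-level simplification of A's step (the `ebase ≠ 0` guard is redundant,
-- and `length == 1` collapses into the same formula via base ^ 0 = 1).
theorem recA_cons (D : List String) (c : Char) (rest : List Char) :
    recA D (c :: rest)
      = ((D.filter (fun n =>
            (PySem.Int.ofStr? n).getD 0 < (PySem.Int.ofStr? (String.ofList [c])).getD 0)).length : Int)
          * ((D.length : Int)) ^ rest.length
        + (if String.ofList [c] ∈ D then recA D rest else 0) := by
  simp only [recA]
  rw [foldl_count_filter]
  set e : Int := ((D.filter (fun n =>
      decide ((PySem.Int.ofStr? n).getD 0 < (PySem.Int.ofStr? (String.ofList [c])).getD 0))).length : Int) with he'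
  cases rest with
  | nil =>
    by_cases he : e = 0 <;> by_cases hm : String.ofList [c] ∈ D <;> simp [recA, he, hm]
  | cons d t =>
    by_cases he : e = 0 <;> by_cases hm : String.ofList [c] ∈ D <;> simp [he, hm]

-- Loop invariant: running B's loop on the suffix `l` starting at index `i`
-- (with i + l.length = L) adds exactly A's recursive value for that suffix.
theorem recLoop_eq (D : List String) (l : List Char) (L i : Nat) (r : Int)
    (h : i + l.length = L) :
    recLoop D (D.length : Int) l L i r = r + recA D l := by
  induction l generalizing i r with
  | nil => simp [recLoop, recA]
  | cons c rest ih =>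
    have he : L - 1 - i = rest.length := by
      simp only [List.length_cons] at h; omega
    have hrec : i + 1 + rest.length = L := by
      simp only [List.length_cons] at h; omega
    simp only [recLoop, he, recA_cons]
    by_cases hm : String.ofList [c] ∈ D
    · simp only [hm, if_pos, ih _ _ hrec]; ring
    · simp only [hm, if_false]; ring

-- ===== VERDICT (by name: the statement is the Claim_ definition above) =====
theorem rec_spec : Claim_equal_rec := by
  intro D num _ _
  unfold Spec_rec rec rec_alt
  cases hl : num.toList with
  | nil => simp [recA]
  | cons c rest =>
    simp only [List.length_cons]
    rw [if_neg (Nat.succ_ne_zero rest.length),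
        recLoop_eq D (c :: rest) (rest.length + 1) 0 0 (by simp)]
    simp
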